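-- pv_equiv track=rewrite | github.com/Datka78123/GOA_HOMEWORKS | day_045/home work/hw4.py | calc
-- ===== SOURCE A (Python) =====
-- def calc(x):
--     total1 = ''
--     for i in x:
--         total1 += str(ord(i))
--
--     total2 = ''
--     for ch in total1:
--         if ch == '7':
--             total2 += '1'
--         else:
--             total2 += ch
--
--     sum1 = 0
--     for j in total1:
--         sum1 += int(j)
--
--     sum2 = 0
--     for j in total2:
--         sum2 += int(j)
--
--     return sum1 - sum2
-- ===== SOURCE B (Python) =====
-- def calc(x):
--     s = ''.join(str(ord(i)) for i in x)
--     return 6 * s.count('7')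
-- ===== Notes on version B (the rewrite author's own statement) =====
-- stated objective: simpler
-- what changed: Replaces the replace-then-rebuild second string and the two separate digit-sum loops by the closed form 6 times the count of the digit seven in the ord-string, since each replacement lowers the digit sum by exactly 6.
import Mathlib
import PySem

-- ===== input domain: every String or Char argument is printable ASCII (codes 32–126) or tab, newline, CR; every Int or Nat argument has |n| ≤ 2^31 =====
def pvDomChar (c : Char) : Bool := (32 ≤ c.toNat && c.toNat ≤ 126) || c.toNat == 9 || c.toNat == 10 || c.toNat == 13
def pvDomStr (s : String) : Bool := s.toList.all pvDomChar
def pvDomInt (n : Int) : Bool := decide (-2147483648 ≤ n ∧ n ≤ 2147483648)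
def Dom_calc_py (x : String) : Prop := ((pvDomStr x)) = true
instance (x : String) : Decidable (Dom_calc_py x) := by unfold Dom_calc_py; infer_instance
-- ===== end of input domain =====

-- B replaces A's replace-and-double-digit-sum passes by the closed form 6 * count of '7' in the ord-string (objective: simpler).


-- ===== PORT A =====
-- strings are handled as lists of chars; int(j) → (PySem.Int.ofChars? [j]).getD 0, exact here since
-- every j is a decimal digit of str(ord(i)) (so int(j) never raises)
def calc_py (x : String) : Int :=
  let total1 : List Char := x.toList.foldl (fun acc i => acc ++ PySem.Int.toChars (i.toNat : Int)) []
  let total2 : List Char := total1.foldl (fun acc ch => if ch = '7' then acc ++ ['1'] else acc ++ [ch]) []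
  let sum1 : Int := total1.foldl (fun s j => s + (PySem.Int.ofChars? [j]).getD 0) 0
  let sum2 : Int := total2.foldl (fun s j => s + (PySem.Int.ofChars? [j]).getD 0) 0
  sum1 - sum2

-- ===== PORT B =====
-- ''.join(str(ord(i)) for i in x) → flatMap; s.count('7') with a single-char needle = List.count
def calc_py_alt (x : String) : Int :=
  let s : List Char := x.toList.flatMap (fun i => PySem.Int.toChars (i.toNat : Int))
  6 * (s.count '7' : Int)

-- ===== PRECONDITION & SPEC =====
def Spec_calc_py (x : String) (out : Int) : Prop := out = calc_py_alt x
instance (x : String) (out : Int) : Decidable (Spec_calc_py x out) := by unfold Spec_calc_py; infer_instance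

-- ===== CLAIM (what is proved, stated in full; the proofs are below) =====
def Claim_equal_calc_py : Prop := ∀ (x : String), Dom_calc_py x → Spec_calc_py x (calc_py x)

-- ===== LEMMAS AND PROOFS =====

def pvDig (j : Char) : Int := (PySem.Int.ofChars? [j]).getD 0
def pvRep (ch : Char) : Char := if ch = '7' then '1' else ch

theorem pv_rep_fold (l : List Char) (acc : List Char) :
    l.foldl (fun acc ch => if ch = '7' then acc ++ ['1'] else acc ++ [ch]) acc
      = acc ++ l.map pvRep := by
  have h : (fun (acc : List Char) (ch : Char) => if ch = '7' then acc ++ ['1'] else acc ++ [ch])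
      = fun acc ch => acc ++ [pvRep ch] := by
    funext a c
    by_cases hc : c = '7' <;> simp [pvRep, hc]
  rw [h, PySem.List.foldl_append_singleton_eq_map]

theorem pv_key (l : List Char) :
    (l.map pvDig).sum - (l.map (fun c => pvDig (pvRep c))).sum = 6 * (l.count '7' : Int) := by
  induction l with
  | nil => simp
  | cons c l ih =>
    by_cases hc : c = '7'
    · subst hc
      have h7 : pvDig '7' = 7 := by decide
      have h1 : pvDig (pvRep '7') = 1 := by decide
      simp [h7, h1]
      omega
    · have hr : pvRep c = c := by simp [pvRep, hc]
      simp [hc, hr]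
      omega

theorem calc_py_spec : Claim_equal_calc_py := by
  intro x _
  unfold Spec_calc_py calc_py calc_py_alt
  simp only [PySem.List.foldl_append_eq_flatMap, pv_rep_fold, PySem.List.foldl_add,
    List.nil_append, zero_add, List.map_map]
  exact pv_key _
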